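-- pv_equiv track=rewrite | github.com/arrayumi/PythonSeminars | Task026.py | list_neg
-- ===== SOURCE A (Python) =====
-- def list_neg(num):
--     list = []
--     list.append(1)
--     list.append(-1)
--     num1, num2 = list[0], list[1]
--     for i in range(2, num):
--         num1, num2 = num2, num1 - num2
--         list.append(num2)
--     list.reverse()
--     return list
-- ===== SOURCE B (Python) =====
-- def list_neg(num):
--     n = max(num, 2)
--     fibs = [1, 1]
--     for _ in range(2, n):
--         fibs.append(fibs[-1] + fibs[-2])
--     result = [f if i % 2 == 0 else -f for i, f in enumerate(fibs)]
--     result.reverse()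
--     return result
-- ===== Notes on version B (the rewrite author's own statement) =====
-- stated objective: alternative
-- what changed: Replaces A's fused subtractive signed recurrence (appending num1-num2 inside the loop) with two separate passes: build the plain Fibonacci table, then decorate it with alternating signs via enumerate, then reverse.
import Mathlib
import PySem

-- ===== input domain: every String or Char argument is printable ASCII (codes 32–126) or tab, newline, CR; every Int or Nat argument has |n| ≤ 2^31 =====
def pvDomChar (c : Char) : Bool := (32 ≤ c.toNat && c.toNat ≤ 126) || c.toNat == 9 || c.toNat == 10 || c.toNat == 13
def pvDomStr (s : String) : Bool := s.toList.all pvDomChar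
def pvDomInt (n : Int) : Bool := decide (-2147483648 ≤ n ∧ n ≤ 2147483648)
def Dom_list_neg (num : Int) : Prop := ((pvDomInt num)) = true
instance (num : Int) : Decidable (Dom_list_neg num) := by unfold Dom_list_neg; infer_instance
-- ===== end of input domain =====

-- B replaces A's fused subtractive signed recurrence with two separate passes
-- (build the plain Fibonacci table, then decorate with alternating signs) — objective: alternative.

-- ===== PORT A =====
def list_neg (num : Int) : List Int :=
  -- list = []; list.append(1); list.append(-1)
  let l : List Int := ([] ++ [1]) ++ [-1]
  -- num1, num2 = list[0], list[1]   (both always in range on the two-element list)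
  let num1 : Int := (PySem.List.pyGet? l 0).getD 0
  let num2 : Int := (PySem.List.pyGet? l 1).getD 0
  -- for i in range(2, num): num1, num2 = num2, num1 - num2; list.append(num2)
  let st := (PySem.List.pyRange 2 num 1).foldl
    (fun (s : List Int × Int × Int) _ =>
      let n1 := s.2.2
      let n2 := s.2.1 - s.2.2
      (s.1 ++ [n2], n1, n2))
    (l, num1, num2)
  st.1.reverse

-- ===== PORT B =====
def list_neg_alt (num : Int) : List Int :=
  let n := max num 2
  -- fibs = [1, 1]; for _ in range(2, n): fibs.append(fibs[-1] + fibs[-2])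
  let fibs := (PySem.List.pyRange 2 n 1).foldl
    (fun fs _ =>
      fs ++ [(PySem.List.pyGet? fs (-1)).getD 0 + (PySem.List.pyGet? fs (-2)).getD 0])
    [1, 1]
  -- result = [f if i % 2 == 0 else -f for i, f in enumerate(fibs)]
  let result := (PySem.List.enumerate fibs 0).map
    (fun p => if p.1 % 2 == 0 then p.2 else -p.2)
  result.reverse

-- ===== PRECONDITION & SPEC =====
def Spec_list_neg (num : Int) (out : List Int) : Prop := out = list_neg_alt num
instance (num : Int) (out : List Int) : Decidable (Spec_list_neg num out) := by unfold Spec_list_neg; infer_instance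

-- ===== CLAIM (what is proved, stated in full; the proofs are below) =====
def Claim_equal_list_neg : Prop := ∀ (num : Int), Dom_list_neg num → Spec_list_neg num (list_neg num)

-- ===== LEMMAS AND PROOFS =====

/-- A's signed sequence: 1, -1, 2, -3, 5, … -/
def pvSf : Nat → Int
  | 0 => 1
  | 1 => -1
  | (k+2) => pvSf k - pvSf (k+1)

/-- B's plain Fibonacci sequence: 1, 1, 2, 3, 5, … -/
def pvFb : Nat → Int
  | 0 => 1
  | 1 => 1
  | (k+2) => pvFb k + pvFb (k+1)

theorem pv_foldl_const {α β : Type} (f : α → α) :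
    ∀ (l : List β) (s : α), l.foldl (fun a _ => f a) s = f^[l.length] s := by
  intro l
  induction l with
  | nil => intro s; rfl
  | cons x xs ih =>
      intro s
      simp [List.foldl, ih, Function.iterate_succ_apply]

theorem pvSf_eq_sign_fb : ∀ i : Nat,
    pvSf i = if ((i : Int) % 2 == 0) then pvFb i else -pvFb i := by
  intro i
  induction i using pvSf.induct with
  | case1 => decide
  | case2 => decide
  | case3 k ih1 ih2 =>
      have hmod : ((k : Int) + 2) % 2 = (k : Int) % 2 := by omega
      simp only [pvSf, pvFb, ih1, ih2, beq_iff_eq]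
      push_cast
      split_ifs with h1 h2 h3 <;> first | (exfalso; omega) | ring

/-- A's loop state after k iterations. -/
theorem pvA_iter : ∀ k : Nat,
    (fun (s : List Int × Int × Int) =>
      (s.1 ++ [s.2.1 - s.2.2], s.2.2, s.2.1 - s.2.2))^[k] ([1, -1], 1, -1)
      = ((List.range (k+2)).map pvSf, pvSf k, pvSf (k+1)) := by
  intro k
  induction k with
  | zero => rfl
  | succ k ih =>
      rw [Function.iterate_succ_apply', ih]
      have h : pvSf k - pvSf (k+1) = pvSf (k+2) := by rw [pvSf]
      simp only [h]
      simp [List.range_succ]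

/-- B's table after k iterations. -/
theorem pvB_iter : ∀ k : Nat,
    (fun (fs : List Int) =>
      fs ++ [(PySem.List.pyGet? fs (-1)).getD 0 + (PySem.List.pyGet? fs (-2)).getD 0])^[k] [1, 1]
      = (List.range (k+2)).map pvFb := by
  intro k
  induction k with
  | zero => rfl
  | succ k ih =>
      rw [Function.iterate_succ_apply', ih]
      set fs := (List.range (k+2)).map pvFb with hfs
      have hlen : fs.length = k + 2 := by simp [hfs]
      have h1 : PySem.List.pyGet? fs (-1) = some (pvFb (k+1)) := by
        rw [PySem.List.pyGet?_neg_ofNat fs 1 (by omega) (by omega)]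
        simp [hfs]
      have h2 : PySem.List.pyGet? fs (-2) = some (pvFb k) := by
        rw [PySem.List.pyGet?_neg_ofNat fs 2 (by omega) (by omega)]
        simp [hfs]
      rw [h1, h2]
      have h : pvFb (k+1) + pvFb k = pvFb (k+2) := by rw [pvFb]; ring
      simp only [Option.getD_some]
      rw [show pvFb (k+1) + pvFb k = pvFb (k+2) from h]
      simp [hfs, List.range_succ]

/-- Decorating the Fibonacci table with alternating signs yields A's signed sequence. -/
theorem pvEnum_sign : ∀ (m s : Nat),
    (PySem.List.enumerate ((List.range' s m).map pvFb) (s : Int)).map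
        (fun p => if p.1 % 2 == 0 then p.2 else -p.2)
      = (List.range' s m).map pvSf := by
  intro m
  induction m with
  | zero => intro s; rfl
  | succ m ih =>
      intro s
      rw [List.range'_succ]
      simp only [List.map_cons, PySem.List.enumerate_cons, List.map_cons]
      have hs : (s : Int) + 1 = ((s + 1 : Nat) : Int) := by push_cast; ring
      rw [hs, ih (s + 1)]
      rw [pvSf_eq_sign_fb s]

theorem pv_ports_eq (num : Int) : list_neg num = list_neg_alt num := by
  unfold list_neg list_neg_alt
  have hrange : PySem.List.pyRange 2 num 1 = PySem.List.pyRange 2 (max num 2) 1 := by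
    by_cases h : num ≤ 2
    · rw [PySem.List.pyRange_one_eq_nil h, max_eq_right h, PySem.List.pyRange_one_eq_nil le_rfl]
    · rw [max_eq_left (by omega)]
  simp only
  rw [hrange, pv_foldl_const, pv_foldl_const]
  set k := (PySem.List.pyRange 2 (max num 2) 1).length with hk
  have hA := pvA_iter k
  have hB := pvB_iter k
  have hinit : (([] : List Int) ++ [1]) ++ [-1] = [1, -1] := rfl
  have hget0 : (PySem.List.pyGet? ([1, -1] : List Int) 0).getD 0 = 1 := by decide
  have hget1 : (PySem.List.pyGet? ([1, -1] : List Int) 1).getD 0 = -1 := by decide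
  rw [hinit, hget0, hget1, hA, hB]
  have := pvEnum_sign (k + 2) 0
  rw [List.range_eq_range']
  rw [show ((0 : Nat) : Int) = 0 from rfl] at this
  rw [this]

-- ===== VERDICT (by name: the statement is the Claim_ definition above) =====
theorem list_neg_spec : Claim_equal_list_neg := by
  intro num _
  unfold Spec_list_neg
  exact pv_ports_eq num
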